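-- pv_equiv track=rewrite | github.com/apragsdale/two_locus_selection | analysis/compute_LD_unphased_outside_domains.py | flip_gts
-- ===== SOURCE A (Python) =====
-- def flip_gts(gts):
--     gts_out = []
--     for gt in gts:
--         if gt == "0|0":
--             gts_out.append("1|1")
--         elif gt == "0|1":
--             gts_out.append("1|0")
--         elif gt == "1|0":
--             gts_out.append("0|1")
--         elif gt == "1|1":
--             gts_out.append("0|0")
--         else:
--             raise ValueError("unexpected genotype", gt)
--     return gts_out
-- ===== SOURCE B (Python) =====
-- def flip_gts(gts):
--     for gt in gts:
--         if gt not in ("0|0", "0|1", "1|0", "1|1"):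
--             raise ValueError("unexpected genotype", gt)
--     if not gts:
--         return []
--     return "\t".join(gts).translate(str.maketrans("01", "10")).split("\t")
-- ===== Notes on version B (the rewrite author's own statement) =====
-- stated objective: alternative
-- what changed: Replaces A's single loop with a 4-way literal branch per element by two stages: a validation pass, then one bulk operation that tab-joins the whole list, bit-flips it with str.translate, and splits it back.
import Mathlib
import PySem

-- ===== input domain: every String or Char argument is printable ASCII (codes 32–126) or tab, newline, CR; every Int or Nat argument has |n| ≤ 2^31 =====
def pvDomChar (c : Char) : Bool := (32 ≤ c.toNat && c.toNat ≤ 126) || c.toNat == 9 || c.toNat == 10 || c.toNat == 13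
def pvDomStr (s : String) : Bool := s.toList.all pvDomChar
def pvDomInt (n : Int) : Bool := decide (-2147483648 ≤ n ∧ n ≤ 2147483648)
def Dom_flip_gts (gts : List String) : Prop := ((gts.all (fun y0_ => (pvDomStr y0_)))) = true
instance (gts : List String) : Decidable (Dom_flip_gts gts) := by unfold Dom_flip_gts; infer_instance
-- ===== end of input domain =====

-- B (objective: alternative) splits the work into two stages: a validation pass, then one
-- bulk tab-join / bitwise translate / split instead of A's per-element 4-way branch.
-- A raises ValueError on any other element; those inputs are excluded by Pre_flip_gts
-- (B raises the same error there).

-- ===== PORT A =====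
def flip_gts (gts : List String) : List String :=
  match gts with
  | [] => []
  | gt :: rest =>
    (if gt = "0|0" then "1|1"
     else if gt = "0|1" then "1|0"
     else if gt = "1|0" then "0|1"
     else if gt = "1|1" then "0|0"
     else "") :: flip_gts rest  -- else-branch: Python raises ValueError; excluded by Pre_

-- ===== PORT B =====
-- str.maketrans("01","10") as a char map: '0'->'1', '1'->'0', everything else unchanged
def pvFlipTrans (c : Char) : Char := if c = '0' then '1' else if c = '1' then '0' else c

-- the membership test of B's validation loop
def pvValidGt (gt : String) : Bool := gt == "0|0" || gt == "0|1" || gt == "1|0" || gt == "1|1"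

def flip_gts_alt (gts : List String) : List String :=
  if gts.all pvValidGt then                  -- the validation loop (invalid: Python raises; excluded by Pre_)
    if gts.isEmpty then []                   -- if not gts: return []
    else                                     -- "\t".join(gts).translate(...).split("\t")
      (((List.intercalate ['\t'] (gts.map String.toList)).map pvFlipTrans).splitOn '\t').map String.ofList
  else []                                    -- unreachable under Pre_ (ValueError)

-- ===== PRECONDITION & SPEC =====
-- Pre_ excludes exactly the inputs on which A (and B) raise ValueError: any element
-- other than the four genotype strings.
def Pre_flip_gts (gts : List String) : Prop :=
  ∀ gt ∈ gts, gt = "0|0" ∨ gt = "0|1" ∨ gt = "1|0" ∨ gt = "1|1"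
instance (gts : List String) : Decidable (Pre_flip_gts gts) := by unfold Pre_flip_gts; infer_instance
def pvWitness_flip_gts : List String := ["0|1", "1|1", "0|0"]

def Spec_flip_gts (gts : List String) (out : List String) : Prop := out = flip_gts_alt gts
instance (gts : List String) (out : List String) : Decidable (Spec_flip_gts gts out) := by unfold Spec_flip_gts; infer_instance

-- ===== CLAIM (what is proved, stated in full; the proofs are below) =====
def Claim_equal_flip_gts : Prop := ∀ (gts : List String), Dom_flip_gts gts → Pre_flip_gts gts → Spec_flip_gts gts (flip_gts gts)

-- ===== LEMMAS AND PROOFS =====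

-- the per-element flip both programs compute on valid genotypes
def pvLitFlip (gt : String) : String :=
  if gt = "0|0" then "1|1" else if gt = "0|1" then "1|0" else if gt = "1|0" then "0|1" else "0|0"

lemma pvMapIntersperse {α β : Type} (f : α → β) (s : α) :
    ∀ l : List α, (l.intersperse s).map f = (l.map f).intersperse (f s)
  | [] => rfl
  | [_] => rfl
  | a :: b :: t => by
    simp only [List.intersperse_cons₂, List.map_cons, pvMapIntersperse f s (b :: t)]

lemma pvMapIntercalateTab (f : Char → Char) (hf : f '\t' = '\t') (ls : List (List Char)) :
    (List.intercalate ['\t'] ls).map f = List.intercalate ['\t'] (ls.map (List.map f)) := by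
  simp [List.intercalate, List.map_flatten, pvMapIntersperse, hf]

lemma pvA_map (gts : List String) (hpre : Pre_flip_gts gts) :
    flip_gts gts = gts.map pvLitFlip := by
  induction gts with
  | nil => rfl
  | cons gt rest ih =>
    have hgt := hpre gt (List.mem_cons_self ..)
    have hrest : Pre_flip_gts rest := fun x hx => hpre x (List.mem_cons_of_mem _ hx)
    rcases hgt with h | h | h | h <;> subst h <;>
      simp [flip_gts, pvLitFlip, ih hrest]

lemma pvB_map (gts : List String) (hpre : Pre_flip_gts gts) :
    flip_gts_alt gts = gts.map pvLitFlip := by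
  have hall : gts.all pvValidGt = true := by
    rw [List.all_eq_true]
    intro gt hgt
    rcases hpre gt hgt with h | h | h | h <;> subst h <;> decide
  unfold flip_gts_alt
  rw [if_pos hall]
  cases hne : gts.isEmpty with
  | true => simp_all [List.isEmpty_iff]
  | false =>
    rw [if_neg (by simp)]
    rw [pvMapIntercalateTab pvFlipTrans (by decide)]
    rw [List.map_map]
    rw [List.splitOn_intercalate _ '\t' ?hx ?hne]
    case hx =>
      intro l hl
      rw [List.mem_map] at hl
      obtain ⟨gt, hgt, rfl⟩ := hl
      rcases hpre gt hgt with h | h | h | h <;> subst h <;> decide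
    case hne =>
      simp at hne
      simpa using hne
    rw [List.map_map]
    apply List.map_congr_left
    intro gt hgt
    rcases hpre gt hgt with h | h | h | h <;> subst h <;> decide

-- ===== VERDICT (by name: the statement is the Claim_ definition above) =====
theorem flip_gts_spec : Claim_equal_flip_gts := by
  intro gts _ hpre
  unfold Spec_flip_gts
  rw [pvA_map gts hpre, pvB_map gts hpre]
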